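-- pv_equiv track=rewrite | github.com/elishakahan/polymathjr-ramsey | r-five-five/H2G#2.py | joinMatrix
-- ===== SOURCE A (Python) =====
-- def transposeVect(bitVect, n, shift): # Transposes bit vector, represented as a int, into a tuple, while also shifting the values in the tuple by a certain number of binary place values
--     return tuple((((1 << (n - i - 1)) & bitVect) >> (n - i - 1)) << shift for i in range(n))
--
-- def transposeMatrix(matrix, m, n): # Transposes formatted matrix
--     transposed = tuple(0 for i in range(n))
--     for i in range(m):
--         newColumn = transposeVect(matrix[i], n, m - i - 1)
--         transposed = tuple(a + b for a, b in zip(transposed,newColumn))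
--     return transposed
--
-- def joinMatrix(G, gSize, H, hSize, neighborhood): # Joins two graphs G and H, with knowledge of connections in between them as given by neighborhood
--     n = 1 + gSize + hSize
--
--     row1 = ((1 << gSize) - 1) << hSize # First row of new matrix
--
--     rowHeader = 1 << (n - 1)
--     column1Top = (rowHeader for i in range(gSize))
--     shiftG = tuple(row << hSize for row in G)
--     transposedNeighborhood = transposeMatrix(neighborhood, hSize, gSize)
--     top = tuple(a + b + c for a, b, c in zip(column1Top, shiftG, transposedNeighborhood)) # The rest of the top consists of G and its neighborhood in H
--
--     shiftedNeighborhood = tuple(row << hSize for row in neighborhood)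
--     bottom = tuple(a + b for a, b in zip(shiftedNeighborhood, H)) # The bottom consists of H and its neighborhood in G
--
--     return (row1,) + top + bottom
-- ===== SOURCE B (Python) =====
-- def joinMatrix(G, gSize, H, hSize, neighborhood):
--     # Per-row assembly: each output row is built directly by reading the bits
--     # it needs, with no transpose helper and no column accumulation.
--     row1 = ((1 << gSize) - 1) << hSize
--     header = 1 << (gSize + hSize)
--     top = [header + (row << hSize)
--            + sum(((neighborhood[i] >> (gSize - g - 1)) & 1) << (hSize - i - 1)
--                  for i in range(hSize))
--            for g, row in zip(range(gSize), G)]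
--     bottom = [(nrow << hSize) + hrow for nrow, hrow in zip(neighborhood, H)]
--     return (row1,) + tuple(top) + tuple(bottom)
-- ===== Notes on version B (the rewrite author's own statement) =====
-- stated objective: simpler
-- what changed: B builds each output row directly (header bit + shifted G/H row + per-bit column read of neighborhood) instead of A's transpose helper built by folding zip-added columns and the triple-zip assembly; Pre_ excludes only the inputs on which A raises (negative sizes, neighborhood shorter than hSize).
import Mathlib
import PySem

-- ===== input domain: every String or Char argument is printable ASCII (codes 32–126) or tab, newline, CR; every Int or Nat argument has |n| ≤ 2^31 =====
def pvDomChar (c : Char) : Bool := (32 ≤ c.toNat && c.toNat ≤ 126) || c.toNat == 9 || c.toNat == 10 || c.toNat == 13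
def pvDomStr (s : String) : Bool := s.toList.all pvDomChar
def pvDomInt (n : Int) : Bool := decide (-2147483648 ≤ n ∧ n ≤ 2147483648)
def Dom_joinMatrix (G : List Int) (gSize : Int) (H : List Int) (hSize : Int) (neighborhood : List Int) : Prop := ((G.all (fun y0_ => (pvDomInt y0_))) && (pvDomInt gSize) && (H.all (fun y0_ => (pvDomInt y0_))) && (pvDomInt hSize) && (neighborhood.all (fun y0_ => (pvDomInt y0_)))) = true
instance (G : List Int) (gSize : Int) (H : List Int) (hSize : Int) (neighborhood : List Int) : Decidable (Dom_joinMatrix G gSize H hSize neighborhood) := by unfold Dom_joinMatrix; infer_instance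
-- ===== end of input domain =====

-- B assembles the joined adjacency matrix row by row, reading each needed bit directly,
-- instead of A's transpose helper plus zip pipelines; objective: simpler decomposition.

-- ===== PORT A =====
def transposeVect (bitVect : Int) (n : Nat) (shift : Nat) : List Int :=
  (List.range n).map (fun i =>
    (PySem.Int.band ((1 : Int) <<< (n - i - 1)) bitVect >>> (n - i - 1)) <<< shift)

def transposeMatrix (matrix : List Int) (m n : Nat) : List Int :=
  (List.range m).foldl (fun transposed i =>
    ((transposed.zip (transposeVect (matrix.getD i 0) n (m - i - 1))).map
      (fun p => p.1 + p.2)))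
    (List.replicate n 0)

def joinMatrix (G : List Int) (gSize : Int) (H : List Int) (hSize : Int) (neighborhood : List Int) : List Int :=
  let n : Int := 1 + gSize + hSize
  let row1 : Int := ((1 <<< gSize.toNat) - 1) <<< hSize.toNat
  let rowHeader : Int := 1 <<< (n - 1).toNat
  let column1Top : List Int := List.replicate gSize.toNat rowHeader
  let shiftG : List Int := G.map (fun (row : Int) => row <<< hSize.toNat)
  let transposedNeighborhood : List Int := transposeMatrix neighborhood hSize.toNat gSize.toNat
  let top : List Int :=
    ((column1Top.zip (shiftG.zip transposedNeighborhood)).map (fun p => p.1 + p.2.1 + p.2.2))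
  let shiftedNeighborhood : List Int := neighborhood.map (fun (row : Int) => row <<< hSize.toNat)
  let bottom : List Int := ((shiftedNeighborhood.zip H).map (fun p => p.1 + p.2))
  row1 :: (top ++ bottom)

-- ===== PORT B =====
-- the inner 'sum(...)' of Source B's top comprehension
def hbits (neighborhood : List Int) (gs hs : Nat) (g : Nat) : Int :=
  (List.range hs).foldl (fun t i =>
    t + (PySem.Int.band (neighborhood.getD i 0 >>> (gs - g - 1)) 1 <<< (hs - i - 1))) 0

def joinMatrix_alt (G : List Int) (gSize : Int) (H : List Int) (hSize : Int) (neighborhood : List Int) : List Int :=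
  let gs : Nat := gSize.toNat
  let hs : Nat := hSize.toNat
  let row1 : Int := ((1 <<< gs) - 1) <<< hs
  let header : Int := 1 <<< (gs + hs)
  let top : List Int := ((List.range gs).zip G).map (fun (p : Nat × Int) =>
    header + (p.2 <<< hs) + hbits neighborhood gs hs p.1)
  let bottom : List Int := (neighborhood.zip H).map (fun (p : Int × Int) => (p.1 <<< hs) + p.2)
  row1 :: (top ++ bottom)

-- ===== PRECONDITION & SPEC =====
-- Pre_ excludes exactly the inputs on which A raises: a negative gSize or hSize
-- (negative shift count → ValueError) and a neighborhood shorter than hSize (IndexError).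
def Pre_joinMatrix (G : List Int) (gSize : Int) (H : List Int) (hSize : Int) (neighborhood : List Int) : Prop :=
  0 ≤ gSize ∧ 0 ≤ hSize ∧ hSize.toNat ≤ neighborhood.length
instance (G : List Int) (gSize : Int) (H : List Int) (hSize : Int) (neighborhood : List Int) : Decidable (Pre_joinMatrix G gSize H hSize neighborhood) := by unfold Pre_joinMatrix; infer_instance
def pvWitness_joinMatrix : List Int × Int × List Int × Int × List Int := ([3, 1], 2, [1], 1, [2, 1])

def Spec_joinMatrix (G : List Int) (gSize : Int) (H : List Int) (hSize : Int) (neighborhood : List Int) (out : List Int) : Prop := out = joinMatrix_alt G gSize H hSize neighborhood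
instance (G : List Int) (gSize : Int) (H : List Int) (hSize : Int) (neighborhood : List Int) (out : List Int) : Decidable (Spec_joinMatrix G gSize H hSize neighborhood out) := by unfold Spec_joinMatrix; infer_instance

-- ===== CLAIM (what is proved, stated in full; the proofs are below) =====
def Claim_equal_joinMatrix : Prop := ∀ (G : List Int) (gSize : Int) (H : List Int) (hSize : Int) (neighborhood : List Int), Dom_joinMatrix G gSize H hSize neighborhood → Pre_joinMatrix G gSize H hSize neighborhood → Spec_joinMatrix G gSize H hSize neighborhood (joinMatrix G gSize H hSize neighborhood)

-- ===== LEMMAS AND PROOFS =====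

-- Nat core of the bit identity: picking bit k with a mask and shifting down
-- equals shifting down and masking with 1.
lemma natbit (m k : Nat) : (2 ^ k &&& m) >>> k = (m >>> k) &&& 1 := by
  rw [Nat.two_pow_and]
  rcases h : m.testBit k <;>
    simp [Nat.and_one_is_mod, Nat.testBit, Nat.shiftRight_eq_div_pow] at * <;> omega

-- Python bit identity on every Int (two's-complement on negatives):
-- ((1 << k) & x) >> k = (x >> k) & 1.
lemma bit_pick (x : Int) (k : Nat) :
    PySem.Int.band ((1 : Int) <<< k) x >>> k = PySem.Int.band (x >>> k) 1 := by
  have h1 : ((1:Int) <<< k) = Int.ofNat (2 ^ k) := by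
    show Int.ofNat (1 <<< k) = _
    rw [Nat.shiftLeft_eq, one_mul]
  cases x with
  | ofNat m =>
      rw [h1]
      have e1 : PySem.Int.band (Int.ofNat (2 ^ k)) (Int.ofNat m) = Int.ofNat (2 ^ k &&& m) := by
        exact_mod_cast PySem.Int.band_natCast (2 ^ k) m
      have e2 : (Int.ofNat m) >>> k = Int.ofNat (m >>> k) := rfl
      have e3 : PySem.Int.band (Int.ofNat (m >>> k)) 1 = Int.ofNat ((m >>> k) &&& 1) := by
        exact_mod_cast PySem.Int.band_natCast (m >>> k) 1
      rw [e1, e2, e3]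
      show Int.ofNat ((2 ^ k &&& m) >>> k) = _
      rw [natbit]
  | negSucc m =>
      rw [h1]
      have e1 : PySem.Int.band (Int.ofNat (2 ^ k)) (Int.negSucc m) = Int.ofNat (2 ^ k - (2 ^ k &&& m)) := by
        unfold PySem.Int.band
        rw [if_pos (show (0:Int) ≤ Int.ofNat (2 ^ k) from Int.natCast_nonneg _),
            if_neg (not_le.mpr (Int.negSucc_lt_zero m))]
        have hm : (-Int.negSucc m - 1).toNat = m := by rw [Int.neg_negSucc]; omega
        have hk : (Int.ofNat (2 ^ k)).toNat = 2 ^ k := rfl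
        rw [hm, hk]; rfl
      have e2 : (Int.negSucc m) >>> k = Int.negSucc (m >>> k) := rfl
      have e3 : PySem.Int.band (Int.negSucc (m >>> k)) 1 = Int.ofNat (1 - (1 &&& (m >>> k))) := by
        unfold PySem.Int.band
        rw [if_neg (not_le.mpr (Int.negSucc_lt_zero _)), if_pos (show (0:Int) ≤ 1 by norm_num)]
        have hj : ∀ j : Nat, (-Int.negSucc j - 1).toNat = j := fun j => by
          rw [Int.neg_negSucc]; omega
        rw [hj (m >>> k)]; rfl
      rw [e1, e2, e3]
      show Int.ofNat ((2 ^ k - (2 ^ k &&& m)) >>> k) = _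
      congr 1
      rw [Nat.two_pow_and, Nat.and_comm, Nat.and_one_is_mod]
      rcases h : m.testBit k <;>
        simp [Nat.testBit, Nat.shiftRight_eq_div_pow] at * <;> omega

-- A's transpose fold, characterised pointwise: entry g of the transpose of the first
-- k rows is the sum over those rows of their g-th bit shifted to place m-i-1.
lemma transpose_fold (matrix : List Int) (m n : Nat) (k : Nat) :
    (List.range k).foldl (fun transposed i =>
      ((transposed.zip (transposeVect (matrix.getD i 0) n (m - i - 1))).map
        (fun p => p.1 + p.2)))
      (List.replicate n 0)
    = (List.range n).map (fun g =>
        (List.range k).foldl (fun t i =>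
          t + ((PySem.Int.band ((1 : Int) <<< (n - g - 1)) (matrix.getD i 0) >>> (n - g - 1)) <<< (m - i - 1))) 0) := by
  induction k with
  | zero => simp [List.map_const']
  | succ k ih =>
      rw [List.range_succ, List.foldl_append, List.foldl_cons, List.foldl_nil, ih]
      show (((List.range n).map _).zip ((List.range n).map _)).map _ = _
      rw [List.zip_map', List.map_map]
      exact List.map_congr_left (fun g _ => by
        rw [List.foldl_append, List.foldl_cons, List.foldl_nil]; rfl)

lemma transposeMatrix_eq (matrix : List Int) (m n : Nat) :
    transposeMatrix matrix m n = (List.range n).map (fun g =>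
      (List.range m).foldl (fun t i =>
        t + ((PySem.Int.band ((1 : Int) <<< (n - g - 1)) (matrix.getD i 0) >>> (n - g - 1)) <<< (m - i - 1))) 0) := by
  unfold transposeMatrix
  exact transpose_fold matrix m n m

-- A's top block (triple zip) equals B's per-row zip map.
lemma top_eq (G N : List Int) (gs hs : Nat) (header : Int) :
    ((List.replicate gs header).zip ((G.map (fun (row : Int) => row <<< hs)).zip
        ((List.range gs).map (fun g =>
          (List.range hs).foldl (fun t i =>
            t + ((PySem.Int.band ((1 : Int) <<< (gs - g - 1)) (N.getD i 0) >>> (gs - g - 1)) <<< (hs - i - 1))) 0)))).map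
      (fun p => p.1 + p.2.1 + p.2.2)
    = ((List.range gs).zip G).map (fun (p : Nat × Int) => header + (p.2 <<< hs) + hbits N gs hs p.1) := by
  apply List.ext_getElem
  · simp; omega
  · intro g h1 h2
    simp only [List.getElem_map, List.getElem_zip, List.getElem_replicate, List.getElem_range]
    congr 1
    unfold hbits
    congr 1
    funext t i
    rw [bit_pick]

-- A's bottom block (shift then zip) equals B's zip-then-shift map.
lemma bottom_eq (N H : List Int) (hs : Nat) :
    ((N.map (fun (row : Int) => row <<< hs)).zip H).map (fun p => p.1 + p.2)
    = (N.zip H).map (fun (p : Int × Int) => (p.1 <<< hs) + p.2) := by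
  apply List.ext_getElem
  · simp
  · intro i h1 h2
    simp

-- ===== VERDICT (by name: the statement is the Claim_ definition above) =====
theorem joinMatrix_spec : Claim_equal_joinMatrix := by
  intro G gSize H hSize N _ hpre
  obtain ⟨hg, hh, _⟩ := hpre
  show joinMatrix G gSize H hSize N = joinMatrix_alt G gSize H hSize N
  have hhead : (1 + gSize + hSize - 1).toNat = gSize.toNat + hSize.toNat := by omega
  simp only [joinMatrix, joinMatrix_alt]
  rw [hhead, transposeMatrix_eq, top_eq, bottom_eq]
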